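-- pv_equiv track=rewrite | github.com/elenafabian/trade | printsequence.py | count
-- ===== SOURCE A (Python) =====
-- def count(input_sequence, depth = 0):
--     if all(x == 0 for x in input_sequence):
--         return depth
--     else:
--         next_sequnce = [abs(input_sequence[1] - input_sequence[0]),
--                         abs(input_sequence[2] - input_sequence[1]),
--                         abs(input_sequence[3] - input_sequence[2]),
--                         abs(input_sequence[3] - input_sequence[0])]
--         return count(next_sequnce, depth + 1)
-- ===== SOURCE B (Python) =====
-- def count(input_sequence, depth=0):
--     # Iterative: loop until all entries are zero, truncating to the first 4
--     # entries and taking cyclic adjacent differences via rotate-and-zip.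
--     seq = input_sequence
--     n = depth
--     while not all(x == 0 for x in seq):
--         seq = seq[:4]
--         seq = [abs(p - q) for p, q in zip(seq[1:] + seq[:1], seq)]
--         n += 1
--     return n
-- ===== Notes on version B (the rewrite author's own statement) =====
-- stated objective: alternative
-- what changed: Replaces the tail recursion with four explicit indexed differences by an iterative while-loop that truncates to the first four entries and computes the Ducci step as a rotate-and-zip comprehension.
import Mathlib
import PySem

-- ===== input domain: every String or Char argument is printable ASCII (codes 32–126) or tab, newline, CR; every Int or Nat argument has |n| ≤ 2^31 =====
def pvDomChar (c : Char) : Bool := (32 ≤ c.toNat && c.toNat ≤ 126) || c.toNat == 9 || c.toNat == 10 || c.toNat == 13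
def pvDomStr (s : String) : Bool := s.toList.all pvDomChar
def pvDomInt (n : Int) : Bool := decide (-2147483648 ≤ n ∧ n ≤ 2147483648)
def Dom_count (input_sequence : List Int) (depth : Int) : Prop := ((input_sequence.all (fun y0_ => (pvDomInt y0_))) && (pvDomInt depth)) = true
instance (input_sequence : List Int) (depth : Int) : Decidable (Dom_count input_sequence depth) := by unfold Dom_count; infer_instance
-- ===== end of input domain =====

-- B replaces A's tail recursion (four explicit indexed differences) by an iterative loop
-- that truncates to the first four entries and takes cyclic adjacent differences via a
-- rotate-and-zip comprehension; equal return values on Pre_count.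

-- ===== PORT A =====
-- A's tail recursion, made total with a fuel counter: 150 exceeds the number of steps any
-- Ducci 4-tuple of 32-bit integers (the Dom_count range) needs, since after one step all
-- entries are nonnegative and every four further steps they all become even, so the fuel-0
-- arm is never reached on Dom_count inputs. The wildcard arm is where Python raises
-- IndexError (fewer than 4 elements, not all zero) — excluded by Pre_count.
def countFuel : Nat → List Int → Int → Int
  | 0, _, depth => depth
  | fuel + 1, input_sequence, depth =>
    if input_sequence.all (fun x => x == 0) then depth
    else
      match input_sequence with
      | a :: b :: c :: d :: _ =>
          countFuel fuel [|b - a|, |c - b|, |d - c|, |d - a|] (depth + 1)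
      | _ => depth

def count (input_sequence : List Int) (depth : Int) : Int :=
  countFuel 150 input_sequence depth

-- ===== PORT B =====
-- one iteration body of B's while-loop: seq[:4], then zip(seq[1:] + seq[:1], seq)
def bstepList (seq : List Int) : List Int :=
  ((PySem.List.slice seq (some 1) none ++ PySem.List.slice seq none (some 1)).zip seq).map
    (fun pq => |pq.1 - pq.2|)

-- B's while-loop with the same fuel guard as port A (never reached on Dom_count inputs)
def bloopFuel (fuel : Nat) (seq : List Int) (n : Int) : Int :=
  match fuel with
  | 0 => n
  | f + 1 =>
    if seq.all (· == 0) then n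
    else bloopFuel f (bstepList (PySem.List.slice seq none (some 4))) (n + 1)

def count_alt (input_sequence : List Int) (depth : Int) : Int :=
  bloopFuel 150 input_sequence depth

-- ===== PRECONDITION & SPEC =====
-- Pre_count excludes exactly the inputs on which Python A raises IndexError:
-- a list with fewer than 4 elements that is not all zeros.
def Pre_count (input_sequence : List Int) (depth : Int) : Prop :=
  input_sequence.all (fun x => x == 0) = true ∨ 4 ≤ input_sequence.length
instance (input_sequence : List Int) (depth : Int) : Decidable (Pre_count input_sequence depth) := by
  unfold Pre_count; infer_instance

def pvWitness_count : List Int × Int := ([3, 1, 4, 1], 0)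

def Spec_count (input_sequence : List Int) (depth : Int) (out : Int) : Prop := out = count_alt input_sequence depth
instance (input_sequence : List Int) (depth : Int) (out : Int) : Decidable (Spec_count input_sequence depth out) := by unfold Spec_count; infer_instance

-- ===== CLAIM (what is proved, stated in full; the proofs are below) =====
def Claim_equal_count : Prop := ∀ (input_sequence : List Int) (depth : Int), Dom_count input_sequence depth → Pre_count input_sequence depth → Spec_count input_sequence depth (count input_sequence depth)

-- ===== LEMMAS AND PROOFS =====

-- unfolding lemmas for the two fueled loops
theorem countFuel_zeroall (f : Nat) (s : List Int) (d : Int)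
    (hz : s.all (fun x => x == 0) = true) : countFuel (f + 1) s d = d := by
  simp [countFuel, hz]

theorem countFuel_cons (f : Nat) (a b c d : Int) (t : List Int) (dep : Int)
    (hz : ¬ ((a :: b :: c :: d :: t).all (fun x => x == 0) = true)) :
    countFuel (f + 1) (a :: b :: c :: d :: t) dep
      = countFuel f [|b - a|, |c - b|, |d - c|, |d - a|] (dep + 1) := by
  simp [countFuel, hz]

theorem bloopFuel_zeroall (f : Nat) (s : List Int) (n : Int)
    (hz : s.all (fun x => x == 0) = true) : bloopFuel (f + 1) s n = n := by
  simp [bloopFuel, hz]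

theorem bloopFuel_step (f : Nat) (s : List Int) (n : Int)
    (hz : ¬ (s.all (fun x => x == 0) = true)) :
    bloopFuel (f + 1) s n
      = bloopFuel f (bstepList (PySem.List.slice s none (some 4))) (n + 1) := by
  simp [bloopFuel, hz]

-- B's loop body on a list starting a::b::c::d is exactly A's next list
theorem bstep_cons (a b c d : Int) (t : List Int) :
    bstepList (PySem.List.slice (a :: b :: c :: d :: t) none (some 4)) =
      [|b - a|, |c - b|, |d - c|, |d - a|] := by
  have h4 : ((4 : Int)) = ((4 : Nat) : Int) := rfl
  rw [h4, PySem.List.slice_to_natCast]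
  show bstepList [a, b, c, d] = _
  have h1 : ((1 : Int)) = ((1 : Nat) : Int) := rfl
  unfold bstepList
  rw [h1, PySem.List.slice_from_natCast, PySem.List.slice_to_natCast]
  simp [List.zip]
  exact abs_sub_comm a d

-- on 4-element lists the two fueled loops agree step for step
theorem loops_agree (fuel : Nat) : ∀ (a b c d : Int) (n : Int),
    countFuel fuel [a, b, c, d] n = bloopFuel fuel [a, b, c, d] n := by
  induction fuel with
  | zero => intro a b c d n; rfl
  | succ f ih =>
    intro a b c d n
    by_cases hz : ([a, b, c, d] : List Int).all (fun x => x == 0) = true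
    · rw [countFuel_zeroall f _ _ hz, bloopFuel_zeroall f _ _ hz]
    · rw [countFuel_cons f a b c d [] n hz, bloopFuel_step f _ _ hz, bstep_cons]
      exact ih _ _ _ _ _

-- ===== VERDICT (by name: the statement is the Claim_ definition above) =====
theorem count_spec : Claim_equal_count := by
  intro l depth _hdom hpre
  unfold Spec_count count count_alt
  by_cases hz : l.all (fun x => x == 0) = true
  · rw [countFuel_zeroall 149 _ _ hz, bloopFuel_zeroall 149 _ _ hz]
  · rcases hpre with hpre | hlen
    · exact absurd hpre hz
    · obtain ⟨a, b, c, d, t, rfl⟩ : ∃ a b c d t, l = a :: b :: c :: d :: t := by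
        match l, hlen with
        | a :: b :: c :: d :: t, _ => exact ⟨a, b, c, d, t, rfl⟩
      rw [countFuel_cons 149 a b c d t depth hz, bloopFuel_step 149 _ _ hz, bstep_cons]
      exact loops_agree 149 _ _ _ _ _
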